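-- pv_equiv track=rewrite | github.com/ucse-ia/ucse_ia | 2013/tp_final/grupo98.py | valid_action
-- ===== SOURCE A (Python) =====
-- def valid_action(action):
--     if not (1 <= len(action) <= 4):
--         return False
--
--     #valid numbers
--     if not all(x in range(1, 10) for x in action):
--         return False
--
--     #all in same row
--     valid_ranges = [(1, 2), (3, 5), (6, 9)]
--     a_min = min(action)
--     a_max = max(action)
--
--     for r_min, r_max in valid_ranges:
--         if a_min <= r_max:
--             break
--
--     if not (a_min >= r_min and a_max <= r_max):
--         return False
--
--     #adjacent
--     l_action = list(action)
--     l_action.sort()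
--     return all(y - x == 1 for x, y in zip(l_action[:-1], l_action[1:]))
-- ===== SOURCE B (Python) =====
-- def valid_action(action):
--     n = len(action)
--     if not (1 <= n <= 4):
--         return False
--     if any(not (1 <= x <= 9) for x in action):
--         return False
--     a_min = min(action)
--     a_max = max(action)
--     if not any(r_min <= a_min and a_max <= r_max
--                for r_min, r_max in [(1, 2), (3, 5), (6, 9)]):
--         return False
--     return a_max - a_min == n - 1 and len(set(action)) == n
-- ===== Notes on version B (the rewrite author's own statement) =====
-- stated objective: simpler
-- what changed: The sort-then-zip adjacency test becomes the arithmetic+set check max-min == len-1 and len(set(action)) == len(action) (no sorting), and the break-loop that picks the row of the minimum becomes a single any() over the three ranges.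
import Mathlib
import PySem

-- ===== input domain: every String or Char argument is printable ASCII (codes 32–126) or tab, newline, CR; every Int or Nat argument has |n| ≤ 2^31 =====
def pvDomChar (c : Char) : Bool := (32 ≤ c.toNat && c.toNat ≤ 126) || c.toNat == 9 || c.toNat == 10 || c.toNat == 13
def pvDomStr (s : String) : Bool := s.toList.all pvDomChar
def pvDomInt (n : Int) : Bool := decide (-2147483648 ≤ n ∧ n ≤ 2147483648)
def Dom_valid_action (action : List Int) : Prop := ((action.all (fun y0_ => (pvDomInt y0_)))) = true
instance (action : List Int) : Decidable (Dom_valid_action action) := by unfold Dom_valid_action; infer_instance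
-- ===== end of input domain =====

-- B replaces the sort-then-zip adjacency test by the arithmetic+set check
-- max-min = len-1 ∧ all-distinct, and the break-loop over rows by a single any(): simpler, no sort.

-- ===== PORT A =====
-- the 'for r_min, r_max in valid_ranges: if a_min <= r_max: break' loop (cur holds the last assigned pair)
def rowPick (a_min : Int) : List (Int × Int) → Int × Int → Int × Int
  | [], cur => cur
  | p :: rest, _ => if a_min ≤ p.2 then p else rowPick a_min rest p

def valid_action (action : List Int) : Bool :=
  if ¬ (1 ≤ action.length ∧ action.length ≤ 4) then false
  else if ¬ (action.all fun x => decide (x ∈ PySem.List.pyRange 1 10)) then false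
  else
    match PySem.List.min? action (fun x => x), PySem.List.max? action (fun x => x) with
    | some a_min, some a_max =>
      let r := rowPick a_min [(1, 2), (3, 5), (6, 9)] (0, 0)
      if ¬ (a_min ≥ r.1 ∧ a_max ≤ r.2) then false
      else
        let l_action := PySem.List.sorted action (fun x => x)
        ((PySem.List.slice l_action none (some (-1))).zip
            (PySem.List.slice l_action (some 1) none)).all
          (fun p => decide (p.2 - p.1 = 1))
    | _, _ => false  -- unreachable: the length guard ensures action ≠ []

-- ===== PORT B =====
def valid_action_alt (action : List Int) : Bool :=
  let n := action.length
  if ¬ (1 ≤ n ∧ n ≤ 4) then false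
  else if action.any (fun x => ¬ (1 ≤ x ∧ x ≤ 9)) then false
  else
    match PySem.List.min? action (fun x => x) with
    | none => false  -- unreachable: the length guard ensures action ≠ []
    | some a_min =>
      match PySem.List.max? action (fun x => x) with
      | none => false  -- unreachable: the length guard ensures action ≠ []
      | some a_max =>
        if ¬ (([((1:Int), (2:Int)), (3, 5), (6, 9)]).any
                fun p => decide (p.1 ≤ a_min ∧ a_max ≤ p.2)) then false
        else decide (a_max - a_min = (n : Int) - 1)
               && (PySem.Set.len (PySem.Set.ofList action) == (n : Int))

-- ===== PRECONDITION & SPEC =====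
def Spec_valid_action (action : List Int) (out : Bool) : Prop := out = valid_action_alt action
instance (action : List Int) (out : Bool) : Decidable (Spec_valid_action action out) := by unfold Spec_valid_action; infer_instance

-- ===== CLAIM (what is proved, stated in full; the proofs are below) =====
def Claim_equal_valid_action : Prop := ∀ (action : List Int), Dom_valid_action action → Spec_valid_action action (valid_action action)

-- ===== LEMMAS AND PROOFS =====

theorem pv_set_len_ofList (xs : List Int) :
    (PySem.Set.ofList xs).length ≤ xs.length ∧
    ((PySem.Set.ofList xs).length = xs.length ↔ xs.Nodup) := by
  induction xs using List.reverseRecOn with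
  | nil => simp [PySem.Set.ofList, PySem.Set.empty]
  | append_singleton ys y ih =>
    have h : PySem.Set.ofList (ys ++ [y]) = PySem.Set.add (PySem.Set.ofList ys) y := by
      simp [PySem.Set.ofList_eq_foldl, List.foldl_append]
    have hnd : (ys ++ [y]).Nodup ↔ ys.Nodup ∧ y ∉ ys := by
      simp only [List.nodup_append, List.nodup_singleton, true_and]
      constructor
      · rintro ⟨h1, h2⟩; exact ⟨h1, fun hm => by simpa using h2 y hm⟩
      · rintro ⟨h1, h2⟩; exact ⟨h1, fun a ha => by simp; rintro rfl; exact h2 ha⟩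
    by_cases hy : y ∈ ys
    · have hc : (PySem.Set.ofList ys).contains y = true := by
        simp [PySem.Set.mem_ofList, hy]
      rw [h]; simp only [PySem.Set.add, hc, if_true, List.length_append, List.length_singleton, hnd]
      refine ⟨by omega, ?_, ?_⟩
      · intro he; exact absurd he (by have := ih.1; omega)
      · rintro ⟨-, hn⟩; exact absurd hy hn
    · have hc : (PySem.Set.ofList ys).contains y = false := by
        simp [PySem.Set.mem_ofList, hy]
      rw [h]; simp only [PySem.Set.add, hc, Bool.false_eq_true, if_false, List.length_append,
        List.length_singleton, hnd]
      refine ⟨by have := ih.1; omega, ?_, ?_⟩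
      · intro he; exact ⟨ih.2.mp (by omega), hy⟩
      · rintro ⟨hn, -⟩; have := ih.2.mpr hn; omega

theorem pv_last_ge : ∀ (l : List Int) (a : Int),
    (a :: l).Pairwise (· ≤ ·) → (a :: l).Nodup →
    ((a :: l).length : Int) - 1 ≤ (a :: l).getLast (by simp) - a := by
  intro l
  induction l with
  | nil => intro a _ _; simp
  | cons b t ih =>
    intro a hp hn
    have hab : a ≤ b := (List.pairwise_cons.mp hp).1 b (by simp)
    have hne : a ≠ b := by
      have := (List.nodup_cons.mp hn).1; simp at this; exact fun h => this.1 h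
    have ih' := ih b (List.pairwise_cons.mp hp).2 (List.nodup_cons.mp hn).2
    rw [List.getLast_cons (by simp)]
    simp only [List.length_cons] at *
    push_cast at *
    omega

theorem pv_chain_iff : ∀ (l : List Int) (a : Int),
    (a :: l).Pairwise (· ≤ ·) →
    ((((a :: l).dropLast.zip (a :: l).tail).all (fun p => decide (p.2 - p.1 = 1)) = true)
      ↔ ((a :: l).getLast (by simp) - a = ((a :: l).length : Int) - 1 ∧ (a :: l).Nodup)) := by
  intro l
  induction l with
  | nil => intro a _; simp
  | cons b t ih =>
    intro a hp
    have hp' := (List.pairwise_cons.mp hp).2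
    have hab : a ≤ b := (List.pairwise_cons.mp hp).1 b (by simp)
    have hbt : ∀ x ∈ b :: t, b ≤ x := by
      intro x hx
      rcases List.mem_cons.mp hx with rfl | hx
      · exact le_refl _
      · exact (List.pairwise_cons.mp hp').1 x hx
    have ih' := ih b hp'
    have hzip : ((a :: b :: t).dropLast.zip (a :: b :: t).tail) =
        (a, b) :: ((b :: t).dropLast.zip (b :: t).tail) := by
      simp [List.dropLast_cons₂]
    rw [hzip, List.getLast_cons (by simp)]
    simp only [List.all_cons, Bool.and_eq_true, decide_eq_true_eq]
    constructor
    · rintro ⟨hba, hrest⟩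
      obtain ⟨hG, hnd⟩ := ih'.mp hrest
      have hanotin : a ∉ b :: t := fun hmem => by have := hbt a hmem; omega
      refine ⟨?_, List.nodup_cons.mpr ⟨hanotin, hnd⟩⟩
      simp only [List.length_cons] at *
      push_cast at *
      omega
    · rintro ⟨hG, hnd⟩
      have hanotin := (List.nodup_cons.mp hnd).1
      have hnd' := (List.nodup_cons.mp hnd).2
      have haltb : a + 1 ≤ b := by
        rcases lt_or_eq_of_le hab with h | h
        · omega
        · exact absurd (h ▸ List.mem_cons_self) hanotin
      have hS := pv_last_ge t b hp' hnd'
      simp only [List.length_cons] at *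
      push_cast at *
      refine ⟨by omega, ih'.mpr ⟨by omega, hnd'⟩⟩

theorem pv_mem_le_getLast : ∀ (l : List Int) (a x : Int),
    (a :: l).Pairwise (· ≤ ·) → x ∈ a :: l → x ≤ (a :: l).getLast (by simp) := by
  intro l
  induction l with
  | nil => intro a x _ hx; simp at hx ⊢; omega
  | cons b t ih =>
    intro a x hp hx
    rw [List.getLast_cons (by simp)]
    have hp' := (List.pairwise_cons.mp hp).2
    rcases List.mem_cons.mp hx with rfl | hx
    · have hab : x ≤ b := (List.pairwise_cons.mp hp).1 b (by simp)
      exact le_trans hab (ih b b hp' (by simp))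
    · exact ih b x hp' hx

theorem pv_adj_eq_arith (action : List Int) (m M : Int)
    (hmin : PySem.List.min? action (fun x => x) = some m)
    (hmax : PySem.List.max? action (fun x => x) = some M) :
    (((PySem.List.slice (PySem.List.sorted action (fun x => x)) none (some (-1))).zip
        (PySem.List.slice (PySem.List.sorted action (fun x => x)) (some 1) none)).all
      (fun p => decide (p.2 - p.1 = 1)))
    = (decide (M - m = (action.length : Int) - 1)
        && (PySem.Set.len (PySem.Set.ofList action) == (action.length : Int))) := by
  have hne : action ≠ [] := by
    intro h; rw [h] at hmin; simp [PySem.List.min?] at hmin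
  rw [PySem.List.slice_to_neg_one, PySem.List.slice_from_one]
  rcases hl : PySem.List.sorted action (fun x => x) with _ | ⟨a, t⟩
  · exact absurd ((PySem.List.sorted_eq_nil_iff _ _ _).mp hl) hne
  · have hperm : (a :: t).Perm action := hl ▸ PySem.List.sorted_perm action (fun x => x) false
    have hp : (a :: t).Pairwise (· ≤ ·) := by
      have := PySem.List.sorted_pairwise action (fun x => x); rw [hl] at this; exact this
    have hma : a ∈ action := hperm.mem_iff.mp (by simp)
    have haM : a = m := by
      have h1 := PySem.List.min?_isMin hmin a hma
      have h2 := PySem.List.key_head_sorted_le action (fun x => x) hl m (PySem.List.min?_mem hmin)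
      simp at h1 h2; omega
    subst haM
    have hG : (a :: t).getLast (by simp) = M := by
      have hGmem : (a :: t).getLast (by simp) ∈ a :: t := List.getLast_mem _
      have h1 := PySem.List.max?_isMax hmax _ (hperm.mem_iff.mp hGmem)
      have h2 := pv_mem_le_getLast t a M hp (hperm.mem_iff.mpr (PySem.List.max?_mem hmax))
      simp at h1 h2; omega
    have hlen : (a :: t).length = action.length := hperm.length_eq
    rw [Bool.eq_iff_iff]
    rw [pv_chain_iff t a hp]
    simp only [Bool.and_eq_true, decide_eq_true_eq, beq_iff_eq, PySem.Set.len]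
    rw [hG, hlen]
    constructor
    · rintro ⟨h1, h2⟩
      exact ⟨h1, by exact_mod_cast congrArg Nat.cast ((pv_set_len_ofList action).2.mpr (hperm.nodup_iff.mp h2))⟩
    · rintro ⟨h1, h2⟩
      refine ⟨h1, hperm.nodup_iff.mpr ((pv_set_len_ofList action).2.mp ?_)⟩
      exact_mod_cast h2

-- ===== VERDICT (by name: the statement is the Claim_ definition above) =====
theorem valid_action_spec : Claim_equal_valid_action := by
  intro action _
  unfold Spec_valid_action valid_action valid_action_alt
  by_cases h1 : 1 ≤ action.length ∧ action.length ≤ 4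
  · by_cases h2 : ∀ x ∈ action, 1 ≤ x ∧ x ≤ 9
    · have hA : (action.all fun x => decide (x ∈ PySem.List.pyRange 1 10)) = true := by
        simp only [List.all_eq_true, decide_eq_true_eq, PySem.List.mem_pyRange_one]
        intro x hx; have := h2 x hx; omega
      have hB : (action.any fun x => decide (¬ (1 ≤ x ∧ x ≤ 9))) = false := by
        simp only [List.any_eq_false, decide_eq_true_eq]
        intro x hx; simp only [not_not]
        exact h2 x hx
      have hne : action ≠ [] := by
        intro h; rw [h] at h1; simp at h1
      rcases hmin : PySem.List.min? action (fun x => x) with _ | m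
      · exact absurd ((PySem.List.min?_eq_none_iff _ _).mp hmin) hne
      rcases hmax : PySem.List.max? action (fun x => x) with _ | M
      · exact absurd ((PySem.List.max?_eq_none_iff _ _).mp hmax) hne
      have hm1 : 1 ≤ m := (h2 m (PySem.List.min?_mem hmin)).1
      have hM9 : M ≤ 9 := (h2 M (PySem.List.max?_mem hmax)).2
      have hmM : m ≤ M := by
        have := PySem.List.min?_isMin hmin M (PySem.List.max?_mem hmax); simpa using this
      have hadj := pv_adj_eq_arith action m M hmin hmax
      simp only [h1, hA, hB, and_self, not_true, Bool.false_eq_true, if_false]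
      by_cases hm2 : m ≤ 2
      · have hr : rowPick m [(1, 2), (3, 5), (6, 9)] (0, 0) = (1, 2) := by
          simp only [rowPick]; rw [if_pos (by simpa using hm2)]
        rw [hr]
        split_ifs with ha hb <;>
          first
            | rfl
            | exact hadj
            | ((exfalso; simp at *) <;> omega)
      · by_cases hm5 : m ≤ 5
        · have hr : rowPick m [(1, 2), (3, 5), (6, 9)] (0, 0) = (3, 5) := by
            simp only [rowPick]; rw [if_neg (by simp; omega), if_pos (by simpa using hm5)]
          rw [hr]
          split_ifs with ha hb <;>
            first
              | rfl
              | exact hadj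
              | ((exfalso; simp at *) <;> omega)
        · have hr : rowPick m [(1, 2), (3, 5), (6, 9)] (0, 0) = (6, 9) := by
            simp only [rowPick]; rw [if_neg (by simp; omega), if_neg (by simp; omega)]
            simp
          rw [hr]
          split_ifs with ha hb <;>
            first
              | rfl
              | exact hadj
              | ((exfalso; simp at *) <;> omega)
    · have hA : (action.all fun x => decide (x ∈ PySem.List.pyRange 1 10)) = false := by
        simp only [List.all_eq_false]
        push_neg at h2
        obtain ⟨x, hx, hx2⟩ := h2
        exact ⟨x, hx, by simp [PySem.List.mem_pyRange_one]; omega⟩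
      have hB : (action.any fun x => decide (¬ (1 ≤ x ∧ x ≤ 9))) = true := by
        simp only [List.any_eq_true]
        push_neg at h2
        obtain ⟨x, hx, hx2⟩ := h2
        exact ⟨x, hx, by simp; omega⟩
      simp only [h1, hA, hB, not_true, Bool.false_eq_true, if_false, if_true, and_self,
        not_false_eq_true]
  · simp [h1]
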